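-- pv_equiv track=rewrite | github.com/Henrique97/PRI_PY | project2_g01/exercise-2.py | gen_graph_weighted
-- ===== SOURCE A (Python) =====
-- def gen_graph_weighted(token_matrix):
--     token_graph = {}
--     for i in range(0, len(token_matrix)):
--         for j in range(0, len(token_matrix[i])):
--             if (token_matrix[i][j] not in token_graph):
--                 token_graph[token_matrix[i][j]] = {}
--             #add all tokens of same sentence
--             for y in range(0, len(token_matrix[i])):
--                 if (token_matrix[i][y] != token_matrix[i][j] and token_matrix[i][y] not in list(token_graph[token_matrix[i][j]])):
--                     token_graph[token_matrix[i][j]][token_matrix[i][y]] = {"weight" : 1}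
--                 elif (token_matrix[i][y] != token_matrix[i][j]):
--                     token_graph[token_matrix[i][j]][token_matrix[i][y]]["weight"] += 1
--     return token_graph
-- ===== SOURCE B (Python) =====
-- def gen_graph_weighted(token_matrix):
--     graph = {}
--     for sent in token_matrix:
--         counts = {}
--         for t in sent:
--             counts[t] = counts.get(t, 0) + 1
--         for u, cu in counts.items():
--             if u not in graph:
--                 graph[u] = {}
--             nbrs = graph[u]
--             for v, cv in counts.items():
--                 if v != u:
--                     if v in nbrs:
--                         nbrs[v]["weight"] += cu * cv
--                     else:
--                         nbrs[v] = {"weight": cu * cv}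
--     return graph
-- ===== Notes on version B (the rewrite author's own statement) =====
-- stated objective: faster
-- what changed: Instead of A's triple nested index loop that rescans the sentence and rebuilds list(inner_dict) for every token pair, B counts each sentence's tokens once into a dict and adds cu*cv per DISTINCT ordered pair with O(1) dict membership, removing both the per-pair key-list scan and the per-occurrence repetition.
import Mathlib
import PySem

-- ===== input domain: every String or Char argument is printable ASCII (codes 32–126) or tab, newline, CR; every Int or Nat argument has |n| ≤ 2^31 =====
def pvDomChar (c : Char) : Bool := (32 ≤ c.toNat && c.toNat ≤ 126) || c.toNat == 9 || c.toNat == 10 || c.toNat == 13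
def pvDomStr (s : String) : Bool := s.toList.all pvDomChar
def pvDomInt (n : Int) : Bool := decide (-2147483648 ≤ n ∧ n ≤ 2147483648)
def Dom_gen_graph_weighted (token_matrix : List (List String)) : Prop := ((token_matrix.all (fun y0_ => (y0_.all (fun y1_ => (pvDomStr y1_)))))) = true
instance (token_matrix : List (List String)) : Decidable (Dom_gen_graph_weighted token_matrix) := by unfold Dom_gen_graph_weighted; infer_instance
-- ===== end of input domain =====

-- B replaces A's cubic per-sentence pair loop (which rescans the sentence and rebuilds
-- list(inner_dict) for every token pair) by counting each sentence's tokens once and adding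
-- cu*cv per distinct ordered pair; objective: faster.

-- ===== PORT A =====
-- Literal port of A.  dict → PySem.Dict; `x not in list(d)` → ¬ d.keys.contains x;
-- `d[k] = …` / `d[k]["weight"] += 1` → Dict.insert / Dict.modify (the modified key always
-- exists when Python reaches that branch, so modify's default is never read).
def gen_graph_weighted (token_matrix : List (List String)) : List (String × List (String × List (String × Int))) :=
  let tg : PySem.Dict String (PySem.Dict String (PySem.Dict String Int)) :=
    (PySem.List.pyRange 0 (PySem.List.len token_matrix) 1).foldl (fun tg i =>
      let sent := PySem.List.pyGetD token_matrix i []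
      (PySem.List.pyRange 0 (PySem.List.len sent) 1).foldl (fun tg j =>
        let u := PySem.List.pyGetD sent j ""
        let tg := if tg.contains u then tg else tg.insert u PySem.Dict.empty
        (PySem.List.pyRange 0 (PySem.List.len sent) 1).foldl (fun tg y =>
          let v := PySem.List.pyGetD sent y ""
          if v ≠ u ∧ ¬ (tg.getD u PySem.Dict.empty).keys.contains v then
            tg.insert u ((tg.getD u PySem.Dict.empty).insert v (PySem.Dict.empty.insert "weight" 1))
          else if v ≠ u then
            tg.insert u ((tg.getD u PySem.Dict.empty).modify v PySem.Dict.empty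
              (fun w => w.modify "weight" 0 (· + 1)))
          else tg) tg) tg) PySem.Dict.empty
  tg.items.map (fun p => (p.1, p.2.items.map (fun q => (q.1, q.2.items))))


-- ===== PORT B =====
-- Literal port of B (Source B): per sentence build `counts`, then one pass over the distinct
-- ordered pairs adding cu*cv.
def gen_graph_weighted_alt (token_matrix : List (List String)) : List (String × List (String × List (String × Int))) :=
  let g : PySem.Dict String (PySem.Dict String (PySem.Dict String Int)) :=
    token_matrix.foldl (fun g sent =>
      let counts : PySem.Dict String Int :=
        sent.foldl (fun c t => c.insert t (c.getD t 0 + 1)) PySem.Dict.empty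
      counts.items.foldl (fun g p =>
        let u := p.1
        let cu := p.2
        let g := if g.contains u then g else g.insert u PySem.Dict.empty
        let nbrs := g.getD u PySem.Dict.empty
        let nbrs := counts.items.foldl (fun d q =>
          let v := q.1
          let cv := q.2
          if v ≠ u then
            if d.keys.contains v then
              d.modify v PySem.Dict.empty (fun w => w.modify "weight" 0 (· + cu * cv))
            else
              d.insert v (PySem.Dict.empty.insert "weight" (cu * cv))
          else d) nbrs
        g.insert u nbrs) g) PySem.Dict.empty
  g.items.map (fun p => (p.1, p.2.items.map (fun q => (q.1, q.2.items))))


-- ===== PRECONDITION & SPEC =====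
def Spec_gen_graph_weighted (token_matrix : List (List String)) (out : List (String × List (String × List (String × Int)))) : Prop := out = gen_graph_weighted_alt token_matrix
instance (token_matrix : List (List String)) (out : List (String × List (String × List (String × Int)))) : Decidable (Spec_gen_graph_weighted token_matrix out) := by unfold Spec_gen_graph_weighted; infer_instance

-- ===== CLAIM (what is proved, stated in full; the proofs are below) =====
def Claim_equal_gen_graph_weighted : Prop := ∀ (token_matrix : List (List String)), Dom_gen_graph_weighted token_matrix → Spec_gen_graph_weighted token_matrix (gen_graph_weighted token_matrix)

-- ===== LEMMAS AND PROOFS =====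
-- ===== proof-side definitions =====

def ybodyA (u : String) (tg : PySem.Dict String (PySem.Dict String (PySem.Dict String Int))) (v : String) :
    PySem.Dict String (PySem.Dict String (PySem.Dict String Int)) :=
  if v ≠ u ∧ ¬ (tg.getD u PySem.Dict.empty).keys.contains v then
    tg.insert u ((tg.getD u PySem.Dict.empty).insert v (PySem.Dict.empty.insert "weight" 1))
  else if v ≠ u then
    tg.insert u ((tg.getD u PySem.Dict.empty).modify v PySem.Dict.empty
      (fun w => w.modify "weight" 0 (· + 1)))
  else tg

def jstepA (s : List String) (tg : PySem.Dict String (PySem.Dict String (PySem.Dict String Int))) (u : String) :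
    PySem.Dict String (PySem.Dict String (PySem.Dict String Int)) :=
  s.foldl (ybodyA u) (if tg.contains u then tg else tg.insert u PySem.Dict.empty)

def sentA (tg : PySem.Dict String (PySem.Dict String (PySem.Dict String Int))) (s : List String) :
    PySem.Dict String (PySem.Dict String (PySem.Dict String Int)) :=
  s.foldl (jstepA s) tg

def qbodyB (u : String) (cu : Int) (d : PySem.Dict String (PySem.Dict String Int)) (q : String × Int) :
    PySem.Dict String (PySem.Dict String Int) :=
  if q.1 ≠ u then
    if d.keys.contains q.1 then
      d.modify q.1 PySem.Dict.empty (fun w => w.modify "weight" 0 (· + cu * q.2))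
    else
      d.insert q.1 (PySem.Dict.empty.insert "weight" (cu * q.2))
  else d

def ubodyB (counts : PySem.Dict String Int)
    (g : PySem.Dict String (PySem.Dict String (PySem.Dict String Int))) (p : String × Int) :
    PySem.Dict String (PySem.Dict String (PySem.Dict String Int)) :=
  (if g.contains p.1 then g else g.insert p.1 PySem.Dict.empty).insert p.1
    (counts.items.foldl (qbodyB p.1 p.2)
      ((if g.contains p.1 then g else g.insert p.1 PySem.Dict.empty).getD p.1 PySem.Dict.empty))

def sentB (g : PySem.Dict String (PySem.Dict String (PySem.Dict String Int))) (s : List String) :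
    PySem.Dict String (PySem.Dict String (PySem.Dict String Int)) :=
  (s.foldl (fun c t => c.insert t (c.getD t 0 + 1)) PySem.Dict.empty).items.foldl
    (ubodyB (s.foldl (fun c t => c.insert t (c.getD t 0 + 1)) PySem.Dict.empty)) g

def toOut (g : PySem.Dict String (PySem.Dict String (PySem.Dict String Int))) :
    List (String × List (String × List (String × Int))) :=
  g.items.map (fun p => (p.1, p.2.items.map (fun q => (q.1, q.2.items))))

def jmidA (s : List String) (tg : PySem.Dict String (PySem.Dict String (PySem.Dict String Int))) (u : String) :
    PySem.Dict String (PySem.Dict String (PySem.Dict String Int)) :=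
  (PySem.List.pyRange 0 (PySem.List.len s) 1).foldl
    (fun tg y => ybodyA u tg (PySem.List.pyGetD s y ""))
    (if tg.contains u then tg else tg.insert u PySem.Dict.empty)

def midA (tg : PySem.Dict String (PySem.Dict String (PySem.Dict String Int))) (s : List String) :
    PySem.Dict String (PySem.Dict String (PySem.Dict String Int)) :=
  (PySem.List.pyRange 0 (PySem.List.len s) 1).foldl
    (fun tg j => jmidA s tg (PySem.List.pyGetD s j "")) tg

theorem jmidA_eq (s : List String) (tg : PySem.Dict String (PySem.Dict String (PySem.Dict String Int))) (u : String) :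
    jmidA s tg u = jstepA s tg u :=
  PySem.List.foldl_pyRange_zero_pyGetD s "" (ybodyA u) _

theorem midA_eq (tg : PySem.Dict String (PySem.Dict String (PySem.Dict String Int))) (s : List String) :
    midA tg s = sentA tg s := by
  unfold midA sentA
  rw [PySem.List.foldl_pyRange_zero_pyGetD s "" (jmidA s) tg]
  have h : jmidA s = jstepA s := funext fun tg => funext fun u => jmidA_eq s tg u
  rw [h]

theorem portA_norm (tm : List (List String)) :
    gen_graph_weighted tm = toOut (tm.foldl sentA PySem.Dict.empty) := by
  have h0 : gen_graph_weighted tm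
      = toOut ((PySem.List.pyRange 0 (PySem.List.len tm) 1).foldl
          (fun tg i => midA tg (PySem.List.pyGetD tm i [])) PySem.Dict.empty) := rfl
  rw [h0, PySem.List.foldl_pyRange_zero_pyGetD tm [] midA PySem.Dict.empty]
  have h : midA = sentA := funext fun tg => funext fun s => midA_eq tg s
  rw [h]

theorem portB_norm (tm : List (List String)) :
    gen_graph_weighted_alt tm = toOut (tm.foldl sentB PySem.Dict.empty) := rfl

def appK {α : Type} (f : String → α → α) (dflt : α) (g : PySem.Dict String α) (u : String) : PySem.Dict String α :=
  g.insert u (f u (g.getD u dflt))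

-- first-occurrence dedup, fuelled so that its cons-unfolding is a plain equation
def dedupFAux : Nat → List String → List String
  | _, [] => []
  | 0, _ :: _ => []
  | n + 1, t :: l => t :: dedupFAux n (l.filter (· ≠ t))

def dedupF (l : List String) : List String := dedupFAux l.length l

theorem dedupFAux_fuel (n : Nat) : ∀ (m : Nat) (l : List String), l.length ≤ n → l.length ≤ m →
    dedupFAux n l = dedupFAux m l := by
  induction n with
  | zero =>
    intro m l h _; cases l with
    | nil => cases m <;> rfl
    | cons t l => simp at h
  | succ n ih =>
    intro m l h hm; cases l with
    | nil => cases m <;> rfl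
    | cons t l =>
      cases m with
      | zero => simp at hm
      | succ m =>
        simp only [dedupFAux]
        congr 1
        exact ih m _ (le_trans (List.length_filter_le _ _) (by simpa using h))
          (le_trans (List.length_filter_le _ _) (by simpa using hm))

theorem dedupF_nil : dedupF [] = [] := rfl

theorem dedupF_cons (t : String) (l : List String) :
    dedupF (t :: l) = t :: dedupF (l.filter (· ≠ t)) := by
  show dedupFAux (l.length + 1) (t :: l) = _
  simp only [dedupFAux]
  congr 1
  exact dedupFAux_fuel l.length _ _ (List.length_filter_le _ _) le_rfl

theorem dedupF_induct (P : List String → Prop) (h0 : P [])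
    (h1 : ∀ t l, P (l.filter (· ≠ t)) → P (t :: l)) : ∀ l, P l := by
  have key : ∀ n (l : List String), l.length ≤ n → P l := by
    intro n
    induction n with
    | zero => intro l h; cases l with
      | nil => exact h0
      | cons t l => simp at h
    | succ n ih =>
      intro l h
      cases l with
      | nil => exact h0
      | cons t l =>
        exact h1 t l (ih _ (le_trans (List.length_filter_le _ _) (by simpa using h)))
  exact fun l => key l.length l le_rfl

theorem mem_dedupF (x : String) : ∀ (l : List String), x ∈ dedupF l ↔ x ∈ l := by
  apply dedupF_induct
  · simp [dedupF_nil]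
  · intro t l ih
    rw [dedupF_cons]
    simp only [List.mem_cons, ih, List.mem_filter]
    constructor
    · rintro (h | h)
      · exact .inl h
      · exact .inr h.1
    · rintro (h | h)
      · exact .inl h
      · by_cases hx : x = t
        · exact .inl hx
        · exact .inr ⟨h, by simp [hx]⟩

theorem nodup_dedupF : ∀ (l : List String), (dedupF l).Nodup := by
  apply dedupF_induct
  · simp [dedupF_nil]
  · intro t l ih
    rw [dedupF_cons]
    refine List.nodup_cons.2 ⟨?_, ih⟩
    intro h
    have := List.mem_filter.1 ((mem_dedupF _ _).1 h)
    simp at this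

theorem dedupF_filter (p : String → Bool) : ∀ (l : List String),
    dedupF (l.filter p) = (dedupF l).filter p := by
  apply dedupF_induct
  · simp [dedupF_nil]
  · intro t l ih
    by_cases hp : p t
    · rw [List.filter_cons_of_pos hp, dedupF_cons, dedupF_cons,
        List.filter_cons_of_pos hp, List.filter_comm, ih]
    · rw [List.filter_cons_of_neg (by simpa using hp), dedupF_cons,
        List.filter_cons_of_neg (by simpa using hp), ← ih]
      have hfix : (l.filter p).filter (fun x => decide (x ≠ t)) = l.filter p := by
        apply List.filter_eq_self.2
        intro x hx
        rcases List.mem_filter.1 hx with ⟨hxl, hxp⟩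
        simp only [decide_eq_true_eq]
        intro hxt; subst hxt; exact hp hxp
      rw [List.filter_comm, hfix]

-- ===== Dict-level base lemmas =====

theorem keysContains_eq {ν : Type} (d : PySem.Dict String ν) (k : String) :
    d.keys.contains k = d.contains k := by
  rw [PySem.Dict.contains_eq_decide_mem_keys]
  simp

theorem insert_getD_self {ν : Type} (d : PySem.Dict String ν) (u : String) (x : ν)
    (hnd : d.keys.Nodup) (hc : d.contains u = true) : d.insert u (d.getD u x) = d := by
  apply PySem.Dict.ext
  rw [PySem.Dict.items_insert_of_contains _ _ hc]
  conv_rhs => rw [← List.map_id d.items]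
  apply List.map_congr_left
  intro p hp
  by_cases h : p.1 = u
  · subst h
    simp only [beq_self_eq_true, if_true, id]
    have : d.getD p.1 x = p.2 :=
      PySem.Dict.getD_of_mem_items _ (by simpa using hp) hnd x
    rw [this]
  · simp [h]

theorem insert_insert_comm {ν : Type} (d : PySem.Dict String ν) (t w : String) (a b : ν)
    (hc : d.contains t = true) (hne : w ≠ t) :
    (d.insert t a).insert w b = (d.insert w b).insert t a := by
  by_cases hw : d.contains w = true
  · have h1 : (d.insert t a).contains w = true := by
      rw [PySem.Dict.contains_insert]; simp [hw]
    have h2 : (d.insert w b).contains t = true := by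
      rw [PySem.Dict.contains_insert]; simp [hc]
    apply PySem.Dict.ext
    rw [PySem.Dict.items_insert_of_contains _ _ h1,
        PySem.Dict.items_insert_of_contains _ _ hc,
        PySem.Dict.items_insert_of_contains _ _ h2,
        PySem.Dict.items_insert_of_contains _ _ hw,
        List.map_map, List.map_map]
    apply List.map_congr_left
    intro p _
    by_cases e1 : p.1 = t
    · simp [Function.comp, e1, Ne.symm hne]
    · by_cases e2 : p.1 = w
      · simp [Function.comp, e2, hne]
      · simp [Function.comp, e1, e2]
  · have hw' : d.contains w = false := by simpa using hw
    have h1 : (d.insert t a).contains w = false := by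
      rw [PySem.Dict.contains_insert]; simp [hne, hw']
    have h2 : (d.insert w b).contains t = true := by
      rw [PySem.Dict.contains_insert]; simp [hc]
    apply PySem.Dict.ext
    rw [PySem.Dict.items_insert_of_not_contains _ _ h1,
        PySem.Dict.items_insert_of_contains _ _ hc,
        PySem.Dict.items_insert_of_contains _ _ h2,
        PySem.Dict.items_insert_of_not_contains _ _ hw',
        List.map_append]
    simp [hne]

-- ===== appK-fold lemmas =====

theorem foldl_insert_at_key {α β : Type} (u : String) (dflt : α) (h : β → α → α) :
    ∀ (L : List β) (g : PySem.Dict String α) (a : α),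
    L.foldl (fun g x => g.insert u (h x (g.getD u dflt))) (g.insert u a)
      = g.insert u (L.foldl (fun a x => h x a) a) := by
  intro L
  induction L with
  | nil => intro g a; rfl
  | cons x L ih =>
    intro g a
    simp only [List.foldl_cons]
    rw [PySem.Dict.getD_insert_self, PySem.Dict.insert_insert_self, ih]

theorem getD_foldl_appK_not_mem {α : Type} (f : String → α → α) (dflt d0 : α) (t : String) :
    ∀ (L : List String) (g : PySem.Dict String α), t ∉ L →
    (L.foldl (appK f dflt) g).getD t d0 = g.getD t d0 := by
  intro L
  induction L with
  | nil => intro g _; rfl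
  | cons w L ih =>
    intro g ht
    rw [List.foldl_cons, ih _ (fun h => ht (List.mem_cons_of_mem _ h))]
    exact PySem.Dict.getD_insert_of_ne _ _ _ (fun h => ht (h ▸ List.mem_cons_self))

theorem foldl_appK_insert_comm {α : Type} (f : String → α → α) (dflt : α) (t : String) (b : α) :
    ∀ (L : List String) (g : PySem.Dict String α), g.contains t = true → t ∉ L →
    L.foldl (appK f dflt) (g.insert t b) = (L.foldl (appK f dflt) g).insert t b := by
  intro L
  induction L with
  | nil => intro g _ _; rfl
  | cons w L ih =>
    intro g hc ht
    have hwt : w ≠ t := fun h => ht (h ▸ List.mem_cons_self)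
    simp only [List.foldl_cons]
    have h1 : appK f dflt (g.insert t b) w = (appK f dflt g w).insert t b := by
      unfold appK
      rw [PySem.Dict.getD_insert_of_ne _ _ _ hwt,
          insert_insert_comm g t w b _ hc hwt]
    rw [h1, ih _ (by simp [appK, PySem.Dict.contains_insert, hc])
      (fun h => ht (List.mem_cons_of_mem _ h))]

theorem pullall {α : Type} (f : String → α → α) (dflt : α) (t : String) :
    ∀ (L : List String) (g : PySem.Dict String α), g.keys.Nodup → g.contains t = true →
    L.foldl (appK f dflt) g
      = (L.filter (· ≠ t)).foldl (appK f dflt)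
          (g.insert t ((f t)^[L.count t] (g.getD t dflt))) := by
  intro L
  induction L with
  | nil =>
    intro g hnd hc
    simp only [List.foldl_nil, List.filter_nil, List.count_nil, Function.iterate_zero, id]
    exact (insert_getD_self g t dflt hnd hc).symm
  | cons w L ih =>
    intro g hnd hc
    by_cases hwt : w = t
    · subst hwt
      simp only [List.foldl_cons, List.count_cons_self]
      rw [List.filter_cons_of_neg (by simp)]
      rw [ih (appK f dflt g w) (PySem.Dict.nodup_keys_insert _ _ _ hnd)
            (by simp [appK])]
      unfold appK
      rw [PySem.Dict.getD_insert_self, PySem.Dict.insert_insert_self,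
          ← Function.iterate_succ_apply]
    · have hfw : (w ≠ t) = True := by simp [hwt]
      simp only [List.foldl_cons, List.filter_cons, hfw, decide_true, if_true,
        List.count_cons_of_ne (by simpa using hwt)]
      rw [ih (appK f dflt g w) (PySem.Dict.nodup_keys_insert _ _ _ hnd)
            (by simp [appK, PySem.Dict.contains_insert, hc])]
      congr 1
      unfold appK
      rw [PySem.Dict.getD_insert_of_ne _ _ _ (fun h => hwt h.symm),
          ← insert_insert_comm g t w _ _ hc hwt,
          PySem.Dict.getD_insert_of_ne _ _ _ hwt]

theorem gen_collapse {α : Type} (f : String → α → α) (dflt : α) :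
    ∀ (l : List String) (g : PySem.Dict String α), g.keys.Nodup →
    l.foldl (appK f dflt) g
      = (dedupF l).foldl (fun g u => g.insert u ((f u)^[l.count u] (g.getD u dflt))) g := by
  apply dedupF_induct (fun l => ∀ (g : PySem.Dict String α), g.keys.Nodup →
    l.foldl (appK f dflt) g
      = (dedupF l).foldl (fun g u => g.insert u ((f u)^[l.count u] (g.getD u dflt))) g)
  · intro g _; simp [dedupF_nil]
  · intro t l ih g hnd
    rw [List.foldl_cons, dedupF_cons, List.foldl_cons]
    rw [pullall f dflt t l (appK f dflt g t)
        (PySem.Dict.nodup_keys_insert _ _ _ hnd) (by simp [appK])]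
    have hcollapse :
        (appK f dflt g t).insert t ((f t)^[l.count t] ((appK f dflt g t).getD t dflt))
          = g.insert t ((f t)^[(t :: l).count t] (g.getD t dflt)) := by
      unfold appK
      rw [PySem.Dict.getD_insert_self, PySem.Dict.insert_insert_self,
          ← Function.iterate_succ_apply, List.count_cons_self]
    rw [hcollapse]
    rw [ih _ (PySem.Dict.nodup_keys_insert _ _ _ hnd)]
    apply PySem.List.foldl_congr_mem
    intro acc x hx
    have hxl := List.mem_filter.1 ((mem_dedupF _ _).1 hx)
    have hxt : x ≠ t := by simpa using hxl.2
    rw [List.count_filter (by simpa using hxt)]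
    have hcc : List.count x (t :: l) = List.count x l := List.count_cons_of_ne (Ne.symm hxt)
    rw [hcc]

theorem foldl_swap {α : Type} (f1 f2 : String → α → α) (dflt : α) :
    ∀ (L : List String), L.Nodup → ∀ (g : PySem.Dict String α),
    L.foldl (appK f2 dflt) (L.foldl (appK f1 dflt) g)
      = L.foldl (appK (fun v => f2 v ∘ f1 v) dflt) g := by
  intro L
  induction L with
  | nil => intro _ g; rfl
  | cons t L ih =>
    intro hnd g
    rcases List.nodup_cons.1 hnd with ⟨htL, hndL⟩
    simp only [List.foldl_cons]
    have hX : appK f2 dflt (L.foldl (appK f1 dflt) (appK f1 dflt g t)) t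
        = L.foldl (appK f1 dflt) (appK (fun v => f2 v ∘ f1 v) dflt g t) := by
      set a1 := f1 t (g.getD t dflt) with ha1
      have h1 : (L.foldl (appK f1 dflt) (appK f1 dflt g t)).getD t dflt = a1 := by
        rw [getD_foldl_appK_not_mem f1 dflt dflt t L _ htL]
        exact PySem.Dict.getD_insert_self _ _ _ _
      have hhead : appK f2 dflt (L.foldl (appK f1 dflt) (appK f1 dflt g t)) t
          = (L.foldl (appK f1 dflt) (appK f1 dflt g t)).insert t
              (f2 t ((L.foldl (appK f1 dflt) (appK f1 dflt g t)).getD t dflt)) := rfl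
      rw [hhead, h1]
      have h2 : (L.foldl (appK f1 dflt) (appK f1 dflt g t)).insert t (f2 t a1)
          = L.foldl (appK f1 dflt) ((appK f1 dflt g t).insert t (f2 t a1)) := by
        exact (foldl_appK_insert_comm f1 dflt t _ L (appK f1 dflt g t)
          (by simp [appK]) htL).symm
      rw [h2]
      congr 1
      show (g.insert t a1).insert t (f2 t a1) = g.insert t (f2 t a1)
      exact PySem.Dict.insert_insert_self _ _ _ _
    rw [hX, ih hndL]

theorem foldl_iterate {α : Type} (f : String → α → α) (dflt : α) :
    ∀ (L : List String), L.Nodup → ∀ (n : Nat) (g : PySem.Dict String α),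
    (fun g => L.foldl (appK f dflt) g)^[n + 1] g
      = L.foldl (appK (fun v a => (f v)^[n + 1] a) dflt) g := by
  intro L hnd n
  induction n with
  | zero =>
    intro g
    apply PySem.List.foldl_congr_mem
    intro acc x _
    simp only [appK, Nat.zero_add, Function.iterate_one]
  | succ n ih =>
    intro g
    rw [Function.iterate_succ_apply, ih, foldl_swap _ _ _ _ hnd]
    apply PySem.List.foldl_congr_mem
    intro acc x _
    simp only [appK, Function.comp]
    conv_rhs => rw [Function.iterate_succ_apply]

theorem foldl_add_eq : ∀ (l s : List String),
    l.foldl PySem.Set.add s = s ++ dedupF (l.filter (fun x => !s.contains x)) := by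
  intro l
  induction l with
  | nil => intro s; simp [dedupF_nil]
  | cons x l ih =>
    intro s
    simp only [List.foldl_cons, List.filter_cons]
    by_cases hx : s.contains x
    · have hmem : x ∈ s := by simpa using hx
      have hadd : PySem.Set.add s x = s := by simp [PySem.Set.add, hmem]
      rw [hadd, ih]
      simp [hmem]
    · have hmem : x ∉ s := by simpa using hx
      have hadd : PySem.Set.add s x = s ++ [x] := by simp [PySem.Set.add, hmem]
      rw [hadd, ih]
      have hf : l.filter (fun y => !(s ++ [x]).contains y)
          = (l.filter (fun y => !s.contains y)).filter (fun y => decide (y ≠ x)) := by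
        rw [List.filter_filter]
        apply List.filter_congr
        intro y _
        by_cases h1 : s.contains y <;> by_cases h2 : y = x <;> simp [h2]
      rw [hf]
      simp only [hx, Bool.not_false, if_true]
      rw [dedupF_cons]
      simp
theorem dedup_eq_dedupF (l : List String) : PySem.List.dedup l = dedupF l := by
  rw [PySem.List.dedup_eq_ofList, PySem.Set.ofList_eq_foldl, foldl_add_eq]
  simp

-- ===== specific layer =====

def bumpW (d : PySem.Dict String (PySem.Dict String Int)) (v : String) (m : Int) :
    PySem.Dict String (PySem.Dict String Int) :=
  d.insert v ((d.getD v PySem.Dict.empty).modify "weight" 0 (· + m))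

def FAfun (s : List String) (u : String) (d : PySem.Dict String (PySem.Dict String Int)) :
    PySem.Dict String (PySem.Dict String Int) :=
  (s.filter (· ≠ u)).foldl (fun d v => bumpW d v 1) d

def PhiN (s : List String) (u : String) (d : PySem.Dict String (PySem.Dict String Int)) :
    PySem.Dict String (PySem.Dict String Int) :=
  ((dedupF s).filter (· ≠ u)).foldl
    (fun d v => bumpW d v ((s.count u : Int) * (s.count v : Int))) d

def NF (s : List String) (g : PySem.Dict String (PySem.Dict String (PySem.Dict String Int))) :
    PySem.Dict String (PySem.Dict String (PySem.Dict String Int)) :=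
  (dedupF s).foldl (fun g u => g.insert u (PhiN s u (g.getD u PySem.Dict.empty))) g

def InvG (g : PySem.Dict String (PySem.Dict String (PySem.Dict String Int))) : Prop :=
  g.keys.Nodup ∧ ∀ p ∈ g.items, p.2.keys.Nodup

theorem foldl_congr_inv_mem {α β : Type} (P : α → Prop) (f g : α → β → α) :
    ∀ (l : List β) (a : α), P a →
    (∀ x ∈ l, ∀ acc, P acc → f acc x = g acc x) →
    (∀ x ∈ l, ∀ acc, P acc → P (g acc x)) →
    l.foldl f a = l.foldl g a := by
  intro l
  induction l with
  | nil => intro a _ _ _; rfl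
  | cons x l ih =>
    intro a hP he hp
    simp only [List.foldl_cons]
    rw [he x List.mem_cons_self a hP]
    exact ih _ (hp x List.mem_cons_self a hP)
      (fun y hy acc h => he y (List.mem_cons_of_mem _ hy) acc h)
      (fun y hy acc h => hp y (List.mem_cons_of_mem _ hy) acc h)

theorem ybodyA_eq (u : String)
    (tg : PySem.Dict String (PySem.Dict String (PySem.Dict String Int))) (v : String) :
    ybodyA u tg v
      = if v = u then tg else tg.insert u (bumpW (tg.getD u PySem.Dict.empty) v 1) := by
  unfold ybodyA bumpW
  by_cases hvu : v = u
  · simp [hvu]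
  · by_cases hcv : (tg.getD u PySem.Dict.empty).keys.contains v = true
    · rw [if_neg (fun h => h.2 hcv), if_pos (by simpa using hvu), if_neg hvu]
      rfl
    · rw [if_pos ⟨by simpa using hvu, by simpa using hcv⟩, if_neg hvu,
        PySem.Dict.getD_of_not_contains (tg.getD u PySem.Dict.empty) (k := v)
          PySem.Dict.empty (by rw [← keysContains_eq]; simpa using hcv)]
      have h0 : PySem.Dict.empty.modify "weight" 0 (· + (1 : Int))
          = PySem.Dict.empty.insert "weight" 1 := by decide
      rw [h0]

theorem qbodyB_eq (u : String) (cu : Int) (d : PySem.Dict String (PySem.Dict String Int))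
    (q : String × Int) :
    qbodyB u cu d q = if q.1 = u then d else bumpW d q.1 (cu * q.2) := by
  unfold qbodyB bumpW
  by_cases hvu : q.1 = u
  · simp [hvu]
  · by_cases hcv : d.keys.contains q.1 = true
    · rw [if_pos (by simpa using hvu), if_pos hcv, if_neg hvu]
      rfl
    · rw [if_pos (by simpa using hvu), if_neg (by simpa using hcv), if_neg hvu,
        PySem.Dict.getD_of_not_contains d (k := q.1) PySem.Dict.empty
          (by rw [← keysContains_eq]; simpa using hcv)]
      have h0 : PySem.Dict.empty.modify "weight" 0 (· + cu * q.2)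
          = PySem.Dict.empty.insert "weight" (cu * q.2) := by
        show PySem.Dict.empty.insert "weight" (0 + cu * q.2) = _
        rw [zero_add]
      rw [h0]

def Hw (m : Int) : String → PySem.Dict String Int → PySem.Dict String Int :=
  fun _ w => w.modify "weight" 0 (· + m)

theorem iter_Hw (k : Int) (n : Nat) (v : String) :
    ∀ w, (Hw k v)^[n + 1] w = w.modify "weight" 0 (· + ((n : Int) + 1) * k) := by
  induction n with
  | zero => intro w; simp [Hw]
  | succ n ih =>
    intro w
    rw [Function.iterate_succ_apply, ih]
    unfold Hw PySem.Dict.modify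
    rw [PySem.Dict.getD_insert_self, PySem.Dict.insert_insert_self]
    congr 1
    push_cast
    ring

theorem ensure_eq (tg : PySem.Dict String (PySem.Dict String (PySem.Dict String Int)))
    (u : String) (hnd : tg.keys.Nodup) :
    (if tg.contains u then tg else tg.insert u PySem.Dict.empty)
      = tg.insert u (tg.getD u PySem.Dict.empty) := by
  by_cases hc : tg.contains u = true
  · rw [if_pos hc, insert_getD_self tg u _ hnd hc]
  · rw [if_neg (by simpa using hc),
      PySem.Dict.getD_of_not_contains tg _ (by simpa using hc)]

theorem jstepA_eq (s : List String)
    (tg : PySem.Dict String (PySem.Dict String (PySem.Dict String Int))) (u : String)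
    (hnd : tg.keys.Nodup) :
    jstepA s tg u = appK (FAfun s) PySem.Dict.empty tg u := by
  unfold jstepA
  rw [ensure_eq tg u hnd]
  have h1 : s.foldl (ybodyA u) (tg.insert u (tg.getD u PySem.Dict.empty))
      = s.foldl (fun acc v => if v ≠ u then
          acc.insert u (bumpW (acc.getD u PySem.Dict.empty) v 1) else acc)
          (tg.insert u (tg.getD u PySem.Dict.empty)) := by
    apply PySem.List.foldl_congr_mem
    intro acc v _
    rw [ybodyA_eq]
    by_cases h : v = u <;> simp [h]
  have h2 := PySem.List.foldl_ite_eq_foldl_filter (fun v : String => v ≠ u)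
    (fun acc (v : String) => acc.insert u (bumpW (acc.getD u PySem.Dict.empty) v 1))
    s (tg.insert u (tg.getD u PySem.Dict.empty))
  rw [h1, h2]
  rw [foldl_insert_at_key u PySem.Dict.empty (fun v a => bumpW a v 1)
    (s.filter (fun v => decide (v ≠ u))) tg (tg.getD u PySem.Dict.empty)]
  rfl

theorem getD_inner_nodup (g : PySem.Dict String (PySem.Dict String (PySem.Dict String Int)))
    (h : InvG g) (u : String) : (g.getD u PySem.Dict.empty).keys.Nodup := by
  rcases hg : g.get? u with _ | v
  · rw [PySem.Dict.getD_of_get?_eq_none _ _ hg]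
    simp
  · rw [PySem.Dict.getD_of_get?_eq_some _ _ hg]
    exact h.2 (u, v) (PySem.Dict.mem_items_of_get?_eq_some _ hg)

theorem bumpW_fold_nodup (m : String → Int) :
    ∀ (L : List String) (d : PySem.Dict String (PySem.Dict String Int)), d.keys.Nodup →
    (L.foldl (fun d v => bumpW d v (m v)) d).keys.Nodup := by
  intro L
  induction L with
  | nil => intro d hd; exact hd
  | cons v L ih =>
    intro d hd
    exact ih _ (PySem.Dict.nodup_keys_insert _ _ _ hd)

theorem FAfun_nodup (s : List String) (u : String)
    (d : PySem.Dict String (PySem.Dict String Int)) (hd : d.keys.Nodup) :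
    (FAfun s u d).keys.Nodup := bumpW_fold_nodup (fun _ => 1) _ d hd

theorem PhiN_nodup (s : List String) (u : String)
    (d : PySem.Dict String (PySem.Dict String Int)) (hd : d.keys.Nodup) :
    (PhiN s u d).keys.Nodup :=
  bumpW_fold_nodup (fun v => (s.count u : Int) * (s.count v : Int)) _ d hd

theorem invG_insert (g : PySem.Dict String (PySem.Dict String (PySem.Dict String Int)))
    (u : String) (x : PySem.Dict String (PySem.Dict String Int))
    (h : InvG g) (hx : x.keys.Nodup) : InvG (g.insert u x) := by
  refine ⟨PySem.Dict.nodup_keys_insert _ _ _ h.1, ?_⟩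
  intro p hp
  rcases (PySem.Dict.mem_items_insert _ _ _ _).1 hp with h1 | h1
  · rw [h1]; exact hx
  · exact h.2 p h1.1

theorem invG_NF_fold (s : List String) :
    ∀ (L : List String) (g : PySem.Dict String (PySem.Dict String (PySem.Dict String Int))),
    InvG g →
    InvG (L.foldl (fun g u => g.insert u (PhiN s u (g.getD u PySem.Dict.empty))) g) := by
  intro L
  induction L with
  | nil => intro g hg; exact hg
  | cons u L ih =>
    intro g hg
    exact ih _ (invG_insert _ _ _ hg (PhiN_nodup s u _ (getD_inner_nodup g hg u)))

theorem invG_NF (s : List String) (g : PySem.Dict String (PySem.Dict String (PySem.Dict String Int)))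
    (h : InvG g) : InvG (NF s g) := invG_NF_fold s _ g h

theorem invG_empty : InvG PySem.Dict.empty := by
  constructor
  · simp
  · intro p hp; simp [PySem.Dict.empty] at hp

theorem FA_phi (s : List String) (u : String) (m : Nat) (hm : 1 ≤ m) :
    ∀ d : PySem.Dict String (PySem.Dict String Int), d.keys.Nodup →
    (FAfun s u)^[m] d
      = ((dedupF s).filter (· ≠ u)).foldl
          (fun d v => bumpW d v ((m : Int) * (s.count v : Int))) d := by
  obtain ⟨n, rfl⟩ : ∃ n, m = n + 1 := ⟨m - 1, by omega⟩
  intro d hd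
  have hFA : ∀ d' : PySem.Dict String (PySem.Dict String Int), d'.keys.Nodup → FAfun s u d'
      = (dedupF (s.filter (· ≠ u))).foldl
          (fun d v => d.insert v ((Hw 1 v)^[(s.filter (· ≠ u)).count v]
            (d.getD v PySem.Dict.empty))) d' := by
    intro d' hd'
    exact gen_collapse (Hw 1) PySem.Dict.empty (s.filter (· ≠ u)) d' hd'
  have hiter : ∀ (k : Nat) (d' : PySem.Dict String (PySem.Dict String Int)), d'.keys.Nodup →
      (FAfun s u)^[k] d'
        = (fun d' => (dedupF (s.filter (· ≠ u))).foldl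
            (fun d v => d.insert v ((Hw 1 v)^[(s.filter (· ≠ u)).count v]
              (d.getD v PySem.Dict.empty))) d')^[k] d' := by
    intro k
    induction k with
    | zero => intro d' _; rfl
    | succ k ih =>
      intro d' hd'
      rw [Function.iterate_succ_apply, Function.iterate_succ_apply,
        ih _ (FAfun_nodup s u d' hd'), hFA d' hd']
  rw [hiter (n + 1) d hd]
  have hfi := foldl_iterate (fun v a => (Hw 1 v)^[(s.filter (· ≠ u)).count v] a)
    PySem.Dict.empty (dedupF (s.filter (· ≠ u))) (nodup_dedupF _) n d
  rw [show (fun d' => (dedupF (s.filter (· ≠ u))).foldl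
        (fun d v => d.insert v ((Hw 1 v)^[(s.filter (· ≠ u)).count v]
          (d.getD v PySem.Dict.empty))) d')
      = (fun g => (dedupF (s.filter (· ≠ u))).foldl
          (appK (fun v a => (Hw 1 v)^[(s.filter (· ≠ u)).count v] a) PySem.Dict.empty) g)
    from rfl, hfi, dedupF_filter (fun v => decide (v ≠ u)) s]
  apply PySem.List.foldl_congr_mem
  intro acc v hv
  have hvf := List.mem_filter.1 hv
  have hvne : v ≠ u := by simpa using hvf.2
  have hvs : v ∈ s := (mem_dedupF v s).1 hvf.1
  have hcc : (s.filter (· ≠ u)).count v = s.count v :=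
    List.count_filter (by simpa using hvne)
  have hc1 : 1 ≤ s.count v := List.count_pos_iff.2 hvs
  have hpos : 1 ≤ s.count v * (n + 1) :=
    le_trans hc1 (Nat.le_mul_of_pos_right _ (by omega))
  show acc.insert v _ = _
  unfold bumpW
  congr 1
  beta_reduce
  rw [hcc, ← Function.iterate_mul,
    show s.count v * (n + 1) = (s.count v * (n + 1) - 1) + 1 from by omega,
    iter_Hw 1 (s.count v * (n + 1) - 1) v]
  congr 1
  funext x
  have : ((s.count v * (n + 1) - 1 : Nat) : Int) + 1 = (s.count v : Int) * ((n : Int) + 1) := by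
    push_cast [Nat.cast_sub hpos]
    ring
  rw [mul_one, this]
  push_cast
  ring

theorem sentA_NF (s : List String)
    (g : PySem.Dict String (PySem.Dict String (PySem.Dict String Int)))
    (h : InvG g) : sentA g s = NF s g := by
  unfold sentA
  have h1 : s.foldl (jstepA s) g = s.foldl (appK (FAfun s) PySem.Dict.empty) g := by
    apply foldl_congr_inv_mem InvG _ _ s g h
    · intro x _ acc hacc
      exact jstepA_eq s acc x hacc.1
    · intro x _ acc hacc
      exact invG_insert _ _ _ hacc (FAfun_nodup s x _ (getD_inner_nodup acc hacc x))
  rw [h1, gen_collapse (FAfun s) PySem.Dict.empty s g h.1]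
  apply foldl_congr_inv_mem InvG _ _ (dedupF s) g h
  · intro u hu acc hacc
    congr 1
    exact FA_phi s u (s.count u) (List.count_pos_iff.2 ((mem_dedupF u s).1 hu)) _
      (getD_inner_nodup acc hacc u)
  · intro u _ acc hacc
    exact invG_insert _ _ _ hacc (PhiN_nodup s u _ (getD_inner_nodup acc hacc u))

theorem ubodyB_eq (counts : PySem.Dict String Int)
    (g : PySem.Dict String (PySem.Dict String (PySem.Dict String Int))) (p : String × Int) :
    ubodyB counts g p
      = g.insert p.1 (counts.items.foldl (qbodyB p.1 p.2) (g.getD p.1 PySem.Dict.empty)) := by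
  unfold ubodyB
  by_cases hc : g.contains p.1 = true
  · rw [if_pos hc]
  · rw [if_neg (by simpa using hc), PySem.Dict.getD_insert_self,
      PySem.Dict.insert_insert_self,
      PySem.Dict.getD_of_not_contains g _ (by simpa using hc)]

theorem inner_B_eq (s : List String) (u : String) (cu : Int)
    (d : PySem.Dict String (PySem.Dict String Int)) :
    (PySem.Dict.counter s).items.foldl (qbodyB u cu) d
      = ((dedupF s).filter (· ≠ u)).foldl
          (fun d v => bumpW d v (cu * (s.count v : Int))) d := by
  rw [PySem.Dict.items_counter, ← PySem.List.dedup_eq_ofList, dedup_eq_dedupF,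
    List.foldl_map]
  have h1 : (dedupF s).foldl (fun d v => qbodyB u cu d (v, (s.count v : Int))) d
      = (dedupF s).foldl (fun d v => if v ≠ u then
          bumpW d v (cu * (s.count v : Int)) else d) d := by
    apply PySem.List.foldl_congr_mem
    intro acc v _
    rw [qbodyB_eq]
    by_cases h : v = u <;> simp [h]
  rw [h1, PySem.List.foldl_ite_eq_foldl_filter (fun v : String => v ≠ u)
    (fun d v => bumpW d v (cu * (s.count v : Int)))]

theorem sentB_NF (s : List String)
    (g : PySem.Dict String (PySem.Dict String (PySem.Dict String Int))) :
    sentB g s = NF s g := by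
  unfold sentB
  rw [PySem.Dict.foldl_insert_getD_add_one_eq_counter s, PySem.Dict.items_counter,
    ← PySem.List.dedup_eq_ofList, dedup_eq_dedupF, List.foldl_map]
  unfold NF
  apply PySem.List.foldl_congr_mem
  intro acc u _
  rw [ubodyB_eq, inner_B_eq]
  rfl

theorem AB_fold (tm : List (List String)) :
    ∀ g, InvG g → tm.foldl sentA g = tm.foldl sentB g := by
  intro g hg
  apply foldl_congr_inv_mem InvG _ _ tm g hg
  · intro s _ acc hacc
    rw [sentA_NF s acc hacc, sentB_NF s acc]
  · intro s _ acc hacc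
    rw [sentB_NF s acc]
    exact invG_NF s acc hacc

theorem final_eq (tm : List (List String)) :
    gen_graph_weighted tm = gen_graph_weighted_alt tm := by
  rw [portA_norm, portB_norm]
  exact congrArg toOut (AB_fold tm PySem.Dict.empty invG_empty)

-- ===== VERDICT (by name: the statement is the Claim_ definition above) =====
theorem gen_graph_weighted_spec : Claim_equal_gen_graph_weighted := by
  intro token_matrix _
  unfold Spec_gen_graph_weighted
  exact final_eq token_matrix
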